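-- pv_equiv track=rewrite | github.com/robertjanmastenbroek/robertjanmastenbroek | contact_manager.py | check_org_duplicate
-- ===== SOURCE A (Python) =====
-- SHARED_PROVIDERS = {
--     "gmail.com","googlemail.com","hotmail.com","outlook.com","live.com",
--     "yahoo.com","mail.com","gmx.com","gmx.ch","gmx.de","icloud.com",
--     "protonmail.com","aol.com","zoho.com","msn.com","live.co.uk",
-- }
--
-- def root_domain(email):
--     """Return root domain (strips subdomains, handles .co.uk etc)."""
--     domain = email.strip().lower().split("@")[-1]
--     parts = domain.split(".")
--     if len(parts) >= 3 and parts[-1] in ("uk","au","nz","za","br","ar"):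
--         return ".".join(parts[-3:])
--     return ".".join(parts[-2:]) if len(parts) >= 2 else domain
--
-- def get_contacted_custom_domains(rows):
--     """Return set of custom domains (non-shared-provider) already sent or bounced."""
--     contacted = set()
--     for r in rows:
--         if r["status"] in ("sent", "skip"):
--             dom = root_domain(r["email"])
--             if dom not in SHARED_PROVIDERS:
--                 contacted.add(dom)
--     return contacted
--
-- def check_org_duplicate(rows, email):
--     """
--     Returns (True, conflict_email) if the org behind this email was already contacted.
--     Uses domain matching for custom domains. Shared providers (gmail etc) are ignored.
--     """
--     dom = root_domain(email)
--     if dom in SHARED_PROVIDERS: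
--         return False, None
--     contacted_domains = get_contacted_custom_domains(rows)
--     if dom in contacted_domains:
--         # Find the email we already sent
--         conflict = next((r["email"] for r in rows if root_domain(r["email"]) == dom
--                          and r["status"] in ("sent", "skip")), None)
--         return True, conflict
--     return False, None
-- ===== SOURCE B (Python) =====
-- SHARED_PROVIDERS = {
--     "gmail.com","googlemail.com","hotmail.com","outlook.com","live.com",
--     "yahoo.com","mail.com","gmx.com","gmx.ch","gmx.de","icloud.com",
--     "protonmail.com","aol.com","zoho.com","msn.com","live.co.uk",
-- }
--
-- def root_domain(email):
--     """Return root domain (strips subdomains, handles .co.uk etc)."""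
--     domain = email.strip().lower().split("@")[-1]
--     parts = domain.split(".")
--     if len(parts) >= 3 and parts[-1] in ("uk","au","nz","za","br","ar"):
--         return ".".join(parts[-3:])
--     return ".".join(parts[-2:]) if len(parts) >= 2 else domain
--
-- def check_org_duplicate(rows, email):
--     """One pass with early exit: no contacted-domain set, no second scan."""
--     dom = root_domain(email)
--     if dom in SHARED_PROVIDERS:
--         return False, None
--     for r in rows:
--         if r["status"] in ("sent", "skip") and root_domain(r["email"]) == dom:
--             return True, r["email"]
--     return False, None
-- ===== Notes on version B (the rewrite author's own statement) =====
-- stated objective: simpler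
-- what changed: Replaces the two-phase algorithm (build a set of contacted custom domains, test membership, then a second next() scan to recover the conflicting email) with a single early-exit pass that returns the first row whose status is sent/skip and whose root domain equals the query's, keeping the shared-provider early return. Pre_ excludes rows missing an 'email' or 'status' key (for non-shared-provider query emails), on which A raises KeyError except in a few cases where a keyless row's status need never be read and both return (False, None).
-- outside the precondition, e.g. on check_org_duplicate([{'status': 'x'}], 'a@b.com'): A returns (False, None), B returns (False, None)
import Mathlib
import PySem

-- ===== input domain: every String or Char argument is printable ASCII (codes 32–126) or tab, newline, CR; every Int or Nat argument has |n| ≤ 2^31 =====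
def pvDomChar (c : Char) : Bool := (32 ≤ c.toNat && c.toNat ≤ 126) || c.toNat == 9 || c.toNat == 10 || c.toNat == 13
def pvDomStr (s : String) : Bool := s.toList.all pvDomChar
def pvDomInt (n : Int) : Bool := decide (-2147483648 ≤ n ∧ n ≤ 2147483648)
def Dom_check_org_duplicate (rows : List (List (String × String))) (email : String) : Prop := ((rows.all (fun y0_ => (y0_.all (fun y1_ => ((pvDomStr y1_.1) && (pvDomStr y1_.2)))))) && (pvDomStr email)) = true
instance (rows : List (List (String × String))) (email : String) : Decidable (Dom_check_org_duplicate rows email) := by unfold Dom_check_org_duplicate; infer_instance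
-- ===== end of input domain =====

-- B replaces A's set-build-then-rescan with one early-exit pass over the rows (objective: simpler).

-- ===== PORT A =====
def sharedProviders : PySem.Set String := PySem.Set.ofList
  ["gmail.com","googlemail.com","hotmail.com","outlook.com","live.com",
   "yahoo.com","mail.com","gmx.com","gmx.ch","gmx.de","icloud.com",
   "protonmail.com","aol.com","zoho.com","msn.com","live.co.uk"]

-- helper shared by both Pythons (same module-level function)
def root_domain (email : String) : String :=
  -- split("@") is never empty, so [-1] is the last element; getD "" is unreachable
  let domain := ((PySem.Str.split? (PySem.Str.lower (PySem.Str.strip email)) "@").getD []).getLast?.getD ""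
  let parts := (PySem.Str.split? domain ".").getD []
  if 3 ≤ parts.length ∧ (parts.getLast?.getD "") ∈ (["uk","au","nz","za","br","ar"] : List String) then
    PySem.Str.join "." (PySem.List.slice parts (some (-3)) none)
  else if 2 ≤ parts.length then
    PySem.Str.join "." (PySem.List.slice parts (some (-2)) none)
  else domain

def get_contacted_custom_domains (rows : List (List (String × String))) : PySem.Set String :=
  rows.foldl (fun contacted r =>
    if (["sent","skip"] : List String).contains (PySem.Dict.getD (PySem.Dict.mk r) "status" "") then
      let dom := root_domain (PySem.Dict.getD (PySem.Dict.mk r) "email" "")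
      if !(PySem.Set.contains sharedProviders dom) then PySem.Set.add contacted dom
      else contacted
    else contacted) PySem.Set.empty

def check_org_duplicate (rows : List (List (String × String))) (email : String) : Bool × Option String :=
  let dom := root_domain email
  if PySem.Set.contains sharedProviders dom then (false, none)
  else
    let contacted := get_contacted_custom_domains rows
    if PySem.Set.contains contacted dom then
      let conflict := (rows.find? (fun r =>
          root_domain (PySem.Dict.getD (PySem.Dict.mk r) "email" "") == dom
          && (["sent","skip"] : List String).contains (PySem.Dict.getD (PySem.Dict.mk r) "status" ""))).map
        (fun r => PySem.Dict.getD (PySem.Dict.mk r) "email" "")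
      (true, conflict)
    else (false, none)

-- ===== PORT B =====
def scan_rows (dom : String) : List (List (String × String)) → Bool × Option String
  | [] => (false, none)
  | r :: rs =>
    let st := PySem.Dict.getD (PySem.Dict.mk r) "status" ""
    if (st == "sent" || st == "skip")
        && root_domain (PySem.Dict.getD (PySem.Dict.mk r) "email" "") == dom then
      (true, some (PySem.Dict.getD (PySem.Dict.mk r) "email" ""))
    else scan_rows dom rs

def check_org_duplicate_alt (rows : List (List (String × String))) (email : String) : Bool × Option String :=
  let dom := root_domain email
  if PySem.Set.contains sharedProviders dom then (false, none)
  else scan_rows dom rows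

-- ===== PRECONDITION & SPEC =====
-- Pre_ excludes rows missing an "email" or "status" key when the query's domain is not a shared
-- provider: there the Python A raises KeyError on almost all of them (slightly narrower: on a few
-- such inputs a keyless row's status never needs reading and A still returns (False, None)).
def Pre_check_org_duplicate (rows : List (List (String × String))) (email : String) : Prop :=
  PySem.Set.contains sharedProviders (root_domain email) = true ∨
  ∀ r ∈ rows, (PySem.Dict.get? (PySem.Dict.mk r) "status").isSome = true ∧
              (PySem.Dict.get? (PySem.Dict.mk r) "email").isSome = true
instance (rows : List (List (String × String))) (email : String) : Decidable (Pre_check_org_duplicate rows email) := by unfold Pre_check_org_duplicate; infer_instance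

def pvWitness_check_org_duplicate : (List (List (String × String))) × String :=
  ([[("email", "a@acme.com"), ("status", "sent")]], "b@acme.com")

def Spec_check_org_duplicate (rows : List (List (String × String))) (email : String) (out : Bool × Option String) : Prop := out = check_org_duplicate_alt rows email
instance (rows : List (List (String × String))) (email : String) (out : Bool × Option String) : Decidable (Spec_check_org_duplicate rows email out) := by unfold Spec_check_org_duplicate; infer_instance

-- ===== CLAIM (what is proved, stated in full; the proofs are below) =====
def Claim_equal_check_org_duplicate : Prop := ∀ (rows : List (List (String × String))) (email : String), Dom_check_org_duplicate rows email → Pre_check_org_duplicate rows email → Spec_check_org_duplicate rows email (check_org_duplicate rows email)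

-- ===== LEMMAS AND PROOFS =====

-- the canonical "row conflicts with dom" predicate (A's find? order)
def rowHit (dom : String) (r : List (String × String)) : Bool :=
  root_domain (PySem.Dict.getD (PySem.Dict.mk r) "email" "") == dom
  && (["sent","skip"] : List String).contains (PySem.Dict.getD (PySem.Dict.mk r) "status" "")

lemma rowHit_comm (dom : String) (r : List (String × String)) :
    rowHit dom r =
      ((PySem.Dict.getD (PySem.Dict.mk r) "status" "" == "sent"
        || PySem.Dict.getD (PySem.Dict.mk r) "status" "" == "skip")
       && root_domain (PySem.Dict.getD (PySem.Dict.mk r) "email" "") == dom) := by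
  simp [rowHit, Bool.and_comm, Bool.beq_eq_decide_eq]

lemma contains_step (dom : String) (hd : PySem.Set.contains sharedProviders dom = false)
    (acc : PySem.Set String) (r : List (String × String)) :
    PySem.Set.contains
      (if (["sent","skip"] : List String).contains (PySem.Dict.getD (PySem.Dict.mk r) "status" "") then
        let d := root_domain (PySem.Dict.getD (PySem.Dict.mk r) "email" "")
        if !(PySem.Set.contains sharedProviders d) then PySem.Set.add acc d
        else acc
      else acc) dom
    = (PySem.Set.contains acc dom || rowHit dom r) := by
  have hd' : dom ∉ (sharedProviders : List String) := by
    intro hm; rw [show sharedProviders.contains dom = true by simpa [PySem.Set.contains] using hm] at hd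
    exact absurd hd (by simp)
  rw [Bool.eq_iff_iff]
  by_cases hst : PySem.Dict.getD (PySem.Dict.mk r) "status" "" = "sent"
      ∨ PySem.Dict.getD (PySem.Dict.mk r) "status" "" = "skip"
  · by_cases hsh : root_domain (PySem.Dict.getD (PySem.Dict.mk r) "email" "") ∈ (sharedProviders : List String)
    · have hne : ¬ root_domain (PySem.Dict.getD (PySem.Dict.mk r) "email" "") = dom :=
        fun he => hd' (he ▸ hsh)
      simp [hst, hsh, rowHit, PySem.Set.contains, Bool.beq_eq_decide_eq, hne]
    · by_cases he : root_domain (PySem.Dict.getD (PySem.Dict.mk r) "email" "") = dom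
      · rw [he] at hsh
        by_cases hm : dom ∈ (acc : List String) <;>
          simp [hst, hsh, he, hm, rowHit, PySem.Set.add, PySem.Set.contains]
      · by_cases hm : root_domain (PySem.Dict.getD (PySem.Dict.mk r) "email" "") ∈ (acc : List String) <;>
          simp [hst, hsh, he, hm, Ne.symm he, rowHit, PySem.Set.add, PySem.Set.contains, Bool.beq_eq_decide_eq]
  · simp [hst, rowHit, Bool.beq_eq_decide_eq]

lemma contains_gccd_fold (dom : String) (hd : PySem.Set.contains sharedProviders dom = false) :
    ∀ (rows : List (List (String × String))) (acc : PySem.Set String),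
      PySem.Set.contains
        (rows.foldl (fun contacted r =>
          if (["sent","skip"] : List String).contains (PySem.Dict.getD (PySem.Dict.mk r) "status" "") then
            let d := root_domain (PySem.Dict.getD (PySem.Dict.mk r) "email" "")
            if !(PySem.Set.contains sharedProviders d) then PySem.Set.add contacted d
            else contacted
          else contacted) acc) dom
      = (PySem.Set.contains acc dom || rows.any (rowHit dom)) := by
  intro rows
  induction rows with
  | nil => intro acc; simp
  | cons r rs ih =>
    intro acc
    rw [List.foldl_cons, List.any_cons, ih, contains_step dom hd, Bool.or_assoc]

lemma scan_rows_eq (dom : String) :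
    ∀ rows : List (List (String × String)),
      scan_rows dom rows =
        if rows.any (rowHit dom) then
          (true, (rows.find? (rowHit dom)).map
            (fun r => PySem.Dict.getD (PySem.Dict.mk r) "email" ""))
        else (false, none) := by
  intro rows
  induction rows with
  | nil => simp [scan_rows]
  | cons r rs ih =>
    by_cases h : rowHit dom r = true
    · have h' := (rowHit_comm dom r) ▸ h
      simp only [scan_rows, h', if_pos, List.any_cons, h, Bool.true_or,
        List.find?_cons_of_pos h, Option.map_some, if_pos]
    · have h' : ((PySem.Dict.getD (PySem.Dict.mk r) "status" "" == "sent"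
          || PySem.Dict.getD (PySem.Dict.mk r) "status" "" == "skip")
          && root_domain (PySem.Dict.getD (PySem.Dict.mk r) "email" "") == dom) = false := by
        rw [← rowHit_comm]; simpa using h
      have hb : rowHit dom r = false := by simpa using h
      simp only [scan_rows, h', Bool.false_eq_true, if_false, ih, List.any_cons, hb,
        Bool.false_or, List.find?_cons_of_neg h]

-- ===== VERDICT (by name: the statement is the Claim_ definition above) =====
theorem check_org_duplicate_spec : Claim_equal_check_org_duplicate := by
  intro rows email _ _
  unfold Spec_check_org_duplicate check_org_duplicate check_org_duplicate_alt
  cases h : sharedProviders.contains (root_domain email) with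
  | true =>
    have h' : root_domain email ∈ (sharedProviders : List String) := by
      simpa [PySem.Set.contains] using h
    simp [h']
  | false =>
    simp only [h, Bool.false_eq_true, if_false]
    rw [scan_rows_eq, get_contacted_custom_domains, contains_gccd_fold _ h]
    have he : PySem.Set.contains (PySem.Set.empty : PySem.Set String) (root_domain email) = false := rfl
    rw [he, Bool.false_or]
    rfl
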